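-- pv_equiv track=rewrite | github.com/rodrigues-heric/ordenacao-python | shell_sort.py | num_passos
-- ===== SOURCE A (Python) =====
-- def num_passos(lista):
-- 	### variaveis
-- 	expoente = 1
-- 	flag = True
--
-- 	### em cada laco procura qual o maior valor possivel
-- 	### que pode ser dividido o tamanho da lista
-- 	while(flag):
-- 		if((len(lista) / (2**expoente)) >= 1):
-- 			expoente += 1
-- 		else:
-- 			flag = False
--
-- 	expoente -= 1
-- 	return expoente
-- ===== SOURCE B (Python) =====
-- def num_passos(lista):
--     return max(len(lista).bit_length() - 1, 0)
-- ===== Notes on version B (the rewrite author's own statement) =====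
-- stated objective: idiomatic
-- what changed: Replaced the doubling while-loop that searches for the largest exponent with the closed form max(len(lista).bit_length() - 1, 0), computing floor(log2(len)) directly.
import Mathlib
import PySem

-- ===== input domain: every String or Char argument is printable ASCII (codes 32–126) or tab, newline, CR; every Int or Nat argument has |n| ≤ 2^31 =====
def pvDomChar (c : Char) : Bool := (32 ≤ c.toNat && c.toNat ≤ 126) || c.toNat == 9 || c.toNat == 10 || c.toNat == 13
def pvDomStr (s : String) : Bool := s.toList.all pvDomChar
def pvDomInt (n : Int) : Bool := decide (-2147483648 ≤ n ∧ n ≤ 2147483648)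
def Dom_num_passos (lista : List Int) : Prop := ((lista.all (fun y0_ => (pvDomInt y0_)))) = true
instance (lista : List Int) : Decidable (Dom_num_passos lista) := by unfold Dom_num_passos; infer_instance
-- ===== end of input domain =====

-- B replaces A's doubling while-loop with the closed form max(bit_length(len) - 1, 0) (idiomatic).

-- ===== PORT A =====
-- the while(flag) loop: while len(lista) / 2**expoente >= 1 (equivalently len ≥ 2^e), expoente += 1
def numPassosLoop (n : Nat) (e : Nat) : Nat :=
  if 2 ^ e ≤ n then numPassosLoop n (e + 1) else e
termination_by n - e
decreasing_by
  have he : e < 2 ^ e := Nat.lt_two_pow_self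
  omega

def num_passos (lista : List Int) : Int :=
  (numPassosLoop lista.length 1 : Int) - 1

-- ===== PORT B =====
-- int.bit_length: 0 for 0, otherwise floor(log2 n) + 1
def bitLength (n : Nat) : Nat :=
  if n = 0 then 0 else Nat.log2 n + 1

def num_passos_alt (lista : List Int) : Int :=
  max ((bitLength lista.length : Int) - 1) 0

-- ===== PRECONDITION & SPEC =====
def Spec_num_passos (lista : List Int) (out : Int) : Prop := out = num_passos_alt lista
instance (lista : List Int) (out : Int) : Decidable (Spec_num_passos lista out) := by unfold Spec_num_passos; infer_instance

-- ===== CLAIM (what is proved, stated in full; the proofs are below) =====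
def Claim_equal_num_passos : Prop := ∀ (lista : List Int), Dom_num_passos lista → Spec_num_passos lista (num_passos lista)

-- ===== LEMMAS AND PROOFS =====
theorem numPassosLoop_eq (n e : Nat) (he : 1 ≤ e) :
    numPassosLoop n e = max e (Nat.log2 n + 1) := by
  induction e using numPassosLoop.induct n with
  | case1 e h ih =>
    rw [numPassosLoop, if_pos h, ih (by omega)]
    have hn : n ≠ 0 := by
      have : 0 < 2 ^ e := Nat.two_pow_pos e
      omega
    have hlog : e ≤ Nat.log2 n := by
      have := (Nat.log2_lt hn (k := e)).not
      omega
    omega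
  | case2 e h =>
    rw [numPassosLoop, if_neg h]
    by_cases hn : n = 0
    · subst hn; simp [Nat.log2]; omega
    · have hlog : Nat.log2 n < e := (Nat.log2_lt hn).mpr (by omega)
      omega

-- ===== VERDICT (by name: the statement is the Claim_ definition above) =====
theorem num_passos_spec : Claim_equal_num_passos := by
  intro lista _
  unfold Spec_num_passos num_passos num_passos_alt bitLength
  rw [numPassosLoop_eq _ 1 le_rfl]
  by_cases h : lista.length = 0
  · simp [h, Nat.log2]
  · have h1 : 1 ≤ Nat.log2 lista.length + 1 := by omega
    rw [if_neg h, Nat.max_eq_right h1]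
    push_cast
    omega
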